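-- pv_equiv track=rewrite | github.com/chaichai1997/python-algorithm | find_min_triple_distance.py | find_min_tripe
-- ===== SOURCE A (Python) =====
-- def find_min_tripe(a, b, c):
--     min_dis = max(abs(a[0]-b[0]), abs(a[0]-c[0]), abs(b[0]-c[0]))
--     for i in a:
--         for j in b:
--             for k in c:
--                 dist = max(abs(i-j), abs(i-k), abs(j-k))
--                 if dist < min_dis:
--                     min_dis = dist
--     return min_dis
-- ===== SOURCE B (Python) =====
-- def find_min_tripe(a, b, c):
--     sa, sb, sc = sorted(a), sorted(b), sorted(c)
--     i = j = k = 0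
--     best = max(sa[0], sb[0], sc[0]) - min(sa[0], sb[0], sc[0])
--     while i < len(sa) and j < len(sb) and k < len(sc):
--         x, y, z = sa[i], sb[j], sc[k]
--         d = max(x, y, z) - min(x, y, z)
--         if d < best:
--             best = d
--         if x <= y and x <= z:
--             i += 1
--         elif y <= z:
--             j += 1
--         else:
--             k += 1
--     return best
-- ===== Notes on version B (the rewrite author's own statement) =====
-- stated objective: faster
-- what changed: Replaces A's brute-force triple loop over all |a|*|b|*|c| triples with sorting the three lists and a single three-pointer sweep that always advances the pointer holding the smallest current value.
import Mathlib
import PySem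

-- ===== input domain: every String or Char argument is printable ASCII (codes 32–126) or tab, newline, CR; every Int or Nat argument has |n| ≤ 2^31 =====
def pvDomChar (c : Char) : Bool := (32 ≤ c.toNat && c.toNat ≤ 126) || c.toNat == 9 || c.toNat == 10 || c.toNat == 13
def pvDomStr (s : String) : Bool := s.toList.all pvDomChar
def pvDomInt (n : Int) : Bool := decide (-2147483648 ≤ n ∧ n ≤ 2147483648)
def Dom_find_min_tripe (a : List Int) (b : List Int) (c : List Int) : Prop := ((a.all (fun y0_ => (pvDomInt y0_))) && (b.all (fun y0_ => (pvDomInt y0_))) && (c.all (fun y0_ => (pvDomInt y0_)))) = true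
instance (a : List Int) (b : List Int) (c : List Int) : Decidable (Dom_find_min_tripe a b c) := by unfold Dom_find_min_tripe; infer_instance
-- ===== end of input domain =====

-- B replaces A's O(|a|·|b|·|c|) triple loop by sorting the three lists and a single
-- three-pointer sweep (always advancing the pointer at the smallest current value),
-- an asymptotically faster exact algorithm for the same minimum.

-- ===== PORT A =====
-- A indexes a[0], b[0], c[0] (IndexError on an empty list: excluded by Pre_), then
-- three nested for-loops keep the smallest max-pairwise-absolute-distance.
def find_min_tripe (a : List Int) (b : List Int) (c : List Int) : Int :=
  match PySem.List.pyGet? a 0, PySem.List.pyGet? b 0, PySem.List.pyGet? c 0 with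
  | some a0, some b0, some c0 =>
    let init := max |a0 - b0| (max |a0 - c0| |b0 - c0|)
    a.foldl (fun m i =>
      b.foldl (fun m j =>
        c.foldl (fun m k =>
          let d := max |i - j| (max |i - k| |j - k|)
          if d < m then d else m) m) m) init
  | _, _, _ => 0  -- Python raises IndexError here (outside Pre_)

-- ===== PORT B =====
-- the three-pointer sweep over the sorted lists (B's while loop, as structural recursion
-- on the three remaining suffixes; the loop ends when one pointer runs off its list)
def tripGo : List Int → List Int → List Int → Int → Int
  | x :: xs, y :: ys, z :: zs, best =>
    let d := max x (max y z) - min x (min y z)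
    let best' := if d < best then d else best
    if x ≤ y ∧ x ≤ z then tripGo xs (y :: ys) (z :: zs) best'
    else if y ≤ z then tripGo (x :: xs) ys (z :: zs) best'
    else tripGo (x :: xs) (y :: ys) zs best'
  | _, _, _, best => best
termination_by xs ys zs _ => xs.length + ys.length + zs.length
decreasing_by all_goals simp [List.length_cons]

def find_min_tripe_alt (a : List Int) (b : List Int) (c : List Int) : Int :=
  let sa := PySem.List.sorted a (fun v => v)
  let sb := PySem.List.sorted b (fun v => v)
  let sc := PySem.List.sorted c (fun v => v)
  match sa with
  | [] => 0  -- Python raises IndexError (outside Pre_)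
  | x :: xs =>
    match sb with
    | [] => 0  -- Python raises IndexError (outside Pre_)
    | y :: ys =>
      match sc with
      | [] => 0  -- Python raises IndexError (outside Pre_)
      | z :: zs =>
        tripGo (x :: xs) (y :: ys) (z :: zs) (max x (max y z) - min x (min y z))

-- ===== PRECONDITION & SPEC =====
-- Pre_ excludes exactly the inputs with an empty list, where Python A raises IndexError.
def Pre_find_min_tripe (a : List Int) (b : List Int) (c : List Int) : Prop :=
  a ≠ [] ∧ b ≠ [] ∧ c ≠ []
instance (a : List Int) (b : List Int) (c : List Int) : Decidable (Pre_find_min_tripe a b c) := by unfold Pre_find_min_tripe; infer_instance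
def pvWitness_find_min_tripe : List Int × List Int × List Int := ([1, 5], [3], [2, 8])

def Spec_find_min_tripe (a : List Int) (b : List Int) (c : List Int) (out : Int) : Prop := out = find_min_tripe_alt a b c
instance (a : List Int) (b : List Int) (c : List Int) (out : Int) : Decidable (Spec_find_min_tripe a b c out) := by unfold Spec_find_min_tripe; infer_instance

-- ===== CLAIM (what is proved, stated in full; the proofs are below) =====
def Claim_equal_find_min_tripe : Prop := ∀ (a : List Int) (b : List Int) (c : List Int), Dom_find_min_tripe a b c → Pre_find_min_tripe a b c → Spec_find_min_tripe a b c (find_min_tripe a b c)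

-- ===== LEMMAS AND PROOFS =====

-- the value both programs minimise: the spread (max − min) of a triple
def range3 (x y z : Int) : Int := max x (max y z) - min x (min y z)

lemma absmax_eq_range3 (x y z : Int) :
    max |x - y| (max |x - z| |y - z|) = range3 x y z := by
  simp only [range3, abs_eq_max_neg, max_def, min_def]
  split_ifs <;> omega

lemma if_lt_eq_min (m d : Int) : (if d < m then d else m) = min m d := by
  rcases lt_or_ge d m with h | h <;> simp [min_def] <;> omega

-- generic facts about folds whose step never increases the accumulator
lemma foldl_le_seed {α : Type} (g : Int → α → Int) (h1 : ∀ m x, g m x ≤ m) :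
    ∀ (l : List α) (m : Int), l.foldl g m ≤ m := by
  intro l
  induction l with
  | nil => intro m; simp
  | cons h t ih => intro m; exact le_trans (ih (g m h)) (h1 m h)

lemma foldl_le_at {α : Type} (g : Int → α → Int) (h1 : ∀ m x, g m x ≤ m)
    {x : α} {B : Int} (hx : ∀ m, g m x ≤ B) :
    ∀ (l : List α) (m : Int), x ∈ l → l.foldl g m ≤ B := by
  intro l
  induction l with
  | nil => intro m hm; simp at hm
  | cons h t ih =>
    intro m hm
    rcases List.mem_cons.mp hm with rfl | hmem
    · exact le_trans (foldl_le_seed g h1 t (g m x)) (hx m)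
    · exact ih (g m h) hmem

lemma foldl_cases {α : Type} (g : Int → α → Int) (P : Int → Prop) :
    ∀ (l : List α) (m : Int), (∀ m x, x ∈ l → (g m x = m ∨ P (g m x))) →
      (l.foldl g m = m ∨ P (l.foldl g m)) := by
  intro l
  induction l with
  | nil => intro m _; left; rfl
  | cons h t ih =>
    intro m hg
    have hstep := hg m h (List.mem_cons_self ..)
    have htail := ih (g m h) (fun m x hx => hg m x (List.mem_cons_of_mem _ hx))
    rw [List.foldl_cons]
    rcases hstep with he | hp
    · rw [he] at htail; rw [he]; exact htail
    · rcases htail with he | hp'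
      · rw [he]; right; exact hp
      · right; exact hp'

-- A's nested loops, written with min and range3
def nestedMin (a b c : List Int) (init : Int) : Int :=
  a.foldl (fun m i =>
    b.foldl (fun m j =>
      c.foldl (fun m k => min m (range3 i j k)) m) m) init

lemma find_min_tripe_eq_nested (a0 b0 c0 : Int) (as bs cs : List Int) :
    find_min_tripe (a0 :: as) (b0 :: bs) (c0 :: cs)
      = nestedMin (a0 :: as) (b0 :: bs) (c0 :: cs) (range3 a0 b0 c0) := by
  simp only [find_min_tripe, nestedMin, if_lt_eq_min, absmax_eq_range3,
    show ∀ (t : Int) (ts : List Int), PySem.List.pyGet? (t :: ts) 0 = some t from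
      fun t ts => by simp [PySem.List.pyGet?, PySem.List.pyIdx?]]

-- step functions of the three loop levels never increase the accumulator
lemma innerC_le_seed (i j : Int) (c : List Int) (m : Int) :
    c.foldl (fun m k => min m (range3 i j k)) m ≤ m :=
  foldl_le_seed _ (fun m _ => min_le_left m _) c m

lemma innerB_le_seed (i : Int) (b c : List Int) (m : Int) :
    b.foldl (fun m j => c.foldl (fun m k => min m (range3 i j k)) m) m ≤ m :=
  foldl_le_seed _ (fun m j => innerC_le_seed i j c m) b m

lemma nested_le (a b c : List Int) (init : Int) {i j k : Int}
    (hi : i ∈ a) (hj : j ∈ b) (hk : k ∈ c) :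
    nestedMin a b c init ≤ range3 i j k := by
  refine foldl_le_at _ (fun m x => innerB_le_seed x b c m) (fun m => ?_) a init hi
  refine foldl_le_at _ (fun m x => innerC_le_seed i x c m) (fun m => ?_) b m hj
  exact foldl_le_at (fun m k => min m (range3 i j k)) (fun m x => min_le_left _ _)
    (fun m => min_le_right _ _) c m hk

lemma nested_mem (a b c : List Int) (init : Int) :
    nestedMin a b c init = init ∨
      ∃ i ∈ a, ∃ j ∈ b, ∃ k ∈ c, nestedMin a b c init = range3 i j k := by
  refine foldl_cases _ (fun r => ∃ i ∈ a, ∃ j ∈ b, ∃ k ∈ c, r = range3 i j k) a init ?_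
  intro m i hi
  refine foldl_cases _ (fun r => ∃ i ∈ a, ∃ j ∈ b, ∃ k ∈ c, r = range3 i j k) b m ?_
  intro m j hj
  refine foldl_cases _ (fun r => ∃ i ∈ a, ∃ j ∈ b, ∃ k ∈ c, r = range3 i j k) c m ?_
  intro m k hk
  rcases min_cases m (range3 i j k) with ⟨he, _⟩ | ⟨he, _⟩
  · left; exact he
  · right; exact ⟨i, hi, j, hj, k, hk, he⟩

-- B-side facts
lemma tripGo_base (xs ys zs : List Int) (best : Int)
    (h : ∀ (x : Int) (xs' : List Int) (y : Int) (ys' : List Int) (z : Int) (zs' : List Int),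
      xs = x :: xs' → ys = y :: ys' → zs = z :: zs' → False) :
    tripGo xs ys zs best = best := by
  rcases xs with _ | ⟨x', xs'⟩
  · simp [tripGo]
  rcases ys with _ | ⟨y', ys'⟩
  · simp [tripGo]
  rcases zs with _ | ⟨z', zs'⟩
  · simp [tripGo]
  exact (h x' xs' y' ys' z' zs' rfl rfl rfl).elim

lemma tripGo_le_best : ∀ (xs ys zs : List Int) (best : Int), tripGo xs ys zs best ≤ best := by
  intro xs ys zs best
  induction xs, ys, zs, best using tripGo.induct with
  | case1 x xs y ys z zs best d best' h ih =>
    rw [show tripGo (x :: xs) (y :: ys) (z :: zs) best = tripGo xs (y :: ys) (z :: zs) best' by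
      simp only [tripGo, if_pos h]; rfl]
    refine le_trans ih ?_
    simp only [best', d]; split <;> omega
  | case2 x xs y ys z zs best d best' h h2 ih =>
    rw [show tripGo (x :: xs) (y :: ys) (z :: zs) best = tripGo (x :: xs) ys (z :: zs) best' by
      simp only [tripGo, if_neg h, if_pos h2]; rfl]
    refine le_trans ih ?_
    simp only [best', d]; split <;> omega
  | case3 x xs y ys z zs best d best' h h2 ih =>
    rw [show tripGo (x :: xs) (y :: ys) (z :: zs) best = tripGo (x :: xs) (y :: ys) zs best' by
      simp only [tripGo, if_neg h, if_neg h2]; rfl]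
    refine le_trans ih ?_
    simp only [best', d]; split <;> omega
  | case4 xs ys zs best h =>
    have heq : tripGo xs ys zs best = best := tripGo_base xs ys zs best h
    rw [heq]

lemma best'_le_d (best d : Int) : (if d < best then d else best) ≤ d := by
  split <;> omega

lemma tripGo_mem : ∀ (xs ys zs : List Int) (best : Int),
    tripGo xs ys zs best = best ∨
      ∃ x ∈ xs, ∃ y ∈ ys, ∃ z ∈ zs, tripGo xs ys zs best = range3 x y z := by
  intro xs ys zs best
  induction xs, ys, zs, best using tripGo.induct with
  | case1 x xs y ys z zs best d best' h ih =>
    rw [show tripGo (x :: xs) (y :: ys) (z :: zs) best = tripGo xs (y :: ys) (z :: zs) best' by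
      simp only [tripGo, if_pos h]; rfl]
    rcases ih with he | ⟨u, hu, v, hv, w, hw, he⟩
    · rw [he]; simp only [best']
      split
      · right
        exact ⟨x, List.mem_cons_self .., y, List.mem_cons_self .., z, List.mem_cons_self .., rfl⟩
      · left; rfl
    · right
      exact ⟨u, List.mem_cons_of_mem _ hu, v, hv, w, hw, he⟩
  | case2 x xs y ys z zs best d best' h h2 ih =>
    rw [show tripGo (x :: xs) (y :: ys) (z :: zs) best = tripGo (x :: xs) ys (z :: zs) best' by
      simp only [tripGo, if_neg h, if_pos h2]; rfl]
    rcases ih with he | ⟨u, hu, v, hv, w, hw, he⟩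
    · rw [he]; simp only [best']
      split
      · right
        exact ⟨x, List.mem_cons_self .., y, List.mem_cons_self .., z, List.mem_cons_self .., rfl⟩
      · left; rfl
    · right
      exact ⟨u, hu, v, List.mem_cons_of_mem _ hv, w, hw, he⟩
  | case3 x xs y ys z zs best d best' h h2 ih =>
    rw [show tripGo (x :: xs) (y :: ys) (z :: zs) best = tripGo (x :: xs) (y :: ys) zs best' by
      simp only [tripGo, if_neg h, if_neg h2]; rfl]
    rcases ih with he | ⟨u, hu, v, hv, w, hw, he⟩
    · rw [he]; simp only [best']
      split
      · right
        exact ⟨x, List.mem_cons_self .., y, List.mem_cons_self .., z, List.mem_cons_self .., rfl⟩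
      · left; rfl
    · right
      exact ⟨u, hu, v, hv, w, List.mem_cons_of_mem _ hw, he⟩
  | case4 xs ys zs best h =>
    left; exact tripGo_base xs ys zs best h

lemma pairwise_head_le {y v : Int} {ys : List Int}
    (hp : (y :: ys).Pairwise (· ≤ ·)) (hv : v ∈ y :: ys) : y ≤ v := by
  rcases List.mem_cons.mp hv with rfl | hv
  · exact le_refl _
  · exact (List.pairwise_cons.mp hp).1 v hv

lemma range3_x_min {x y z v w : Int} (h1 : x ≤ y) (h2 : x ≤ z) (h3 : y ≤ v) (h4 : z ≤ w) :
    range3 x y z ≤ range3 x v w := by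
  simp only [range3, max_def, min_def]; split_ifs <;> omega

lemma range3_y_min {x y z u w : Int} (h1 : y ≤ x) (h2 : y ≤ z) (h3 : x ≤ u) (h4 : z ≤ w) :
    range3 x y z ≤ range3 u y w := by
  simp only [range3, max_def, min_def]; split_ifs <;> omega

lemma range3_z_min {x y z u v : Int} (h1 : z ≤ x) (h2 : z ≤ y) (h3 : x ≤ u) (h4 : y ≤ v) :
    range3 x y z ≤ range3 u v z := by
  simp only [range3, max_def, min_def]; split_ifs <;> omega

-- the key lemma: on sorted suffixes, the sweep's result is ≤ the spread of EVERY triple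
lemma tripGo_le : ∀ (xs ys zs : List Int) (best : Int),
    xs.Pairwise (· ≤ ·) → ys.Pairwise (· ≤ ·) → zs.Pairwise (· ≤ ·) →
    ∀ u ∈ xs, ∀ v ∈ ys, ∀ w ∈ zs, tripGo xs ys zs best ≤ range3 u v w := by
  intro xs ys zs best
  induction xs, ys, zs, best using tripGo.induct with
  | case1 x xs y ys z zs best d best' h ih =>
    intro hpx hpy hpz u hu v hv w hw
    rw [show tripGo (x :: xs) (y :: ys) (z :: zs) best = tripGo xs (y :: ys) (z :: zs) best' by
      simp only [tripGo, if_pos h]; rfl]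
    rcases List.mem_cons.mp hu with rfl | hu'
    · calc tripGo xs (y :: ys) (z :: zs) best' ≤ best' := tripGo_le_best ..
        _ ≤ d := best'_le_d ..
        _ = range3 u y z := rfl
        _ ≤ range3 u v w :=
          range3_x_min h.1 h.2 (pairwise_head_le hpy hv) (pairwise_head_le hpz hw)
    · exact ih (List.Pairwise.of_cons hpx) hpy hpz u hu' v hv w hw
  | case2 x xs y ys z zs best d best' h h2 ih =>
    intro hpx hpy hpz u hu v hv w hw
    rw [show tripGo (x :: xs) (y :: ys) (z :: zs) best = tripGo (x :: xs) ys (z :: zs) best' by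
      simp only [tripGo, if_neg h, if_pos h2]; rfl]
    have hyx : y ≤ x := by
      by_contra hc
      exact h ⟨by omega, le_trans (by omega) h2⟩
    rcases List.mem_cons.mp hv with rfl | hv'
    · calc tripGo (x :: xs) ys (z :: zs) best' ≤ best' := tripGo_le_best ..
        _ ≤ d := best'_le_d ..
        _ = range3 x v z := rfl
        _ ≤ range3 u v w :=
          range3_y_min hyx h2 (pairwise_head_le hpx hu) (pairwise_head_le hpz hw)
    · exact ih hpx (List.Pairwise.of_cons hpy) hpz u hu v hv' w hw
  | case3 x xs y ys z zs best d best' h h2 ih =>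
    intro hpx hpy hpz u hu v hv w hw
    rw [show tripGo (x :: xs) (y :: ys) (z :: zs) best = tripGo (x :: xs) (y :: ys) zs best' by
      simp only [tripGo, if_neg h, if_neg h2]; rfl]
    have hzy : z ≤ y := by omega
    have hzx : z ≤ x := by
      by_contra hc
      exact h ⟨by omega, by omega⟩
    rcases List.mem_cons.mp hw with rfl | hw'
    · calc tripGo (x :: xs) (y :: ys) zs best' ≤ best' := tripGo_le_best ..
        _ ≤ d := best'_le_d ..
        _ = range3 x y w := rfl
        _ ≤ range3 u v w :=
          range3_z_min hzx hzy (pairwise_head_le hpx hu) (pairwise_head_le hpy hv)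
    · exact ih hpx hpy (List.Pairwise.of_cons hpz) u hu v hv w hw'
  | case4 xs ys zs best h =>
    intro _ _ _ u hu v hv w hw
    rcases xs with _ | ⟨x', xs'⟩
    · exact absurd hu List.not_mem_nil
    rcases ys with _ | ⟨y', ys'⟩
    · exact absurd hv List.not_mem_nil
    rcases zs with _ | ⟨z', zs'⟩
    · exact absurd hw List.not_mem_nil
    exact (h x' xs' y' ys' z' zs' rfl rfl rfl).elim

-- ===== VERDICT (by name: the statement is the Claim_ definition above) =====
theorem find_min_tripe_spec : Claim_equal_find_min_tripe := by
  unfold Claim_equal_find_min_tripe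
  intro a b c _ hpre
  obtain ⟨ha, hb, hc⟩ := hpre
  obtain ⟨a0, as, rfl⟩ := List.exists_cons_of_ne_nil ha
  obtain ⟨b0, bs, rfl⟩ := List.exists_cons_of_ne_nil hb
  obtain ⟨c0, cs, rfl⟩ := List.exists_cons_of_ne_nil hc
  unfold Spec_find_min_tripe
  set A := a0 :: as with hA
  set B := b0 :: bs with hB
  set C := c0 :: cs with hC
  -- sorted lists are nonempty
  have hsaNe : PySem.List.sorted A (fun v => v) ≠ [] :=
    List.ne_nil_of_mem ((PySem.List.mem_sorted A (fun v => v) false a0).mpr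
      (by rw [hA]; exact List.mem_cons_self ..))
  have hsbNe : PySem.List.sorted B (fun v => v) ≠ [] :=
    List.ne_nil_of_mem ((PySem.List.mem_sorted B (fun v => v) false b0).mpr
      (by rw [hB]; exact List.mem_cons_self ..))
  have hscNe : PySem.List.sorted C (fun v => v) ≠ [] :=
    List.ne_nil_of_mem ((PySem.List.mem_sorted C (fun v => v) false c0).mpr
      (by rw [hC]; exact List.mem_cons_self ..))
  obtain ⟨x0, xs, hx⟩ := List.exists_cons_of_ne_nil hsaNe
  obtain ⟨y0, ys, hy⟩ := List.exists_cons_of_ne_nil hsbNe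
  obtain ⟨z0, zs, hz⟩ := List.exists_cons_of_ne_nil hscNe
  have hBalt : find_min_tripe_alt A B C
      = tripGo (x0 :: xs) (y0 :: ys) (z0 :: zs) (range3 x0 y0 z0) := by
    simp only [find_min_tripe_alt, hx, hy, hz, range3]
  have hAeq : find_min_tripe A B C = nestedMin A B C (range3 a0 b0 c0) :=
    find_min_tripe_eq_nested a0 b0 c0 as bs cs
  -- memberships between sorted and original lists
  have hmemA : ∀ t : Int, t ∈ x0 :: xs ↔ t ∈ A := by
    intro t; rw [← hx]; exact PySem.List.mem_sorted A (fun v => v) false t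
  have hmemB : ∀ t : Int, t ∈ y0 :: ys ↔ t ∈ B := by
    intro t; rw [← hy]; exact PySem.List.mem_sorted B (fun v => v) false t
  have hmemC : ∀ t : Int, t ∈ z0 :: zs ↔ t ∈ C := by
    intro t; rw [← hz]; exact PySem.List.mem_sorted C (fun v => v) false t
  have hpx : (x0 :: xs).Pairwise (· ≤ ·) := by
    rw [← hx]; exact PySem.List.sorted_pairwise A (fun v => v)
  have hpy : (y0 :: ys).Pairwise (· ≤ ·) := by
    rw [← hy]; exact PySem.List.sorted_pairwise B (fun v => v)
  have hpz : (z0 :: zs).Pairwise (· ≤ ·) := by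
    rw [← hz]; exact PySem.List.sorted_pairwise C (fun v => v)
  rw [hAeq, hBalt]
  apply le_antisymm
  -- A ≤ B : B's result is the spread of some triple of the input lists
  · rcases tripGo_mem (x0 :: xs) (y0 :: ys) (z0 :: zs) (range3 x0 y0 z0) with he | ⟨u, hu, v, hv, w, hw, he⟩
    · rw [he]
      exact nested_le A B C _ ((hmemA x0).mp (List.mem_cons_self ..))
        ((hmemB y0).mp (List.mem_cons_self ..)) ((hmemC z0).mp (List.mem_cons_self ..))
    · rw [he]
      exact nested_le A B C _ ((hmemA u).mp hu) ((hmemB v).mp hv) ((hmemC w).mp hw)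
  -- B ≤ A : A's result is the spread of some triple, and B is ≤ every such spread
  · rcases nested_mem A B C (range3 a0 b0 c0) with he | ⟨i, hi, j, hj, k, hk, he⟩
    · rw [he]
      exact tripGo_le _ _ _ _ hpx hpy hpz a0 ((hmemA a0).mpr (List.mem_cons_self ..))
        b0 ((hmemB b0).mpr (List.mem_cons_self ..)) c0 ((hmemC c0).mpr (List.mem_cons_self ..))
    · rw [he]
      exact tripGo_le _ _ _ _ hpx hpy hpz i ((hmemA i).mpr hi) j ((hmemB j).mpr hj)
        k ((hmemC k).mpr hk)
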